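-- pv_equiv track=rewrite | github.com/Niru1095/RESTAPI | SubwayRoutes/api/views.py | count_2_more
-- ===== SOURCE A (Python) =====
-- def count_2_more(data):
--     count_dict = {}
--     count = 1
--     for val in data:
--         lst = list(val.values())[1]
--         dict_key = str(lst)
--         if dict_key in count_dict:
--             count_dict[dict_key] = count_dict[dict_key] + 1
--         else:
--             count_dict[dict_key] = count
--     # count2 = min(count_dict, key= lambda x: count_dict[x])
--     filtered_dict = {k:v for (k,v) in count_dict.items() if v>=2 }
--     return list(filtered_dict)
-- ===== SOURCE B (Python) =====
-- def count_2_more(data):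
--     keys = [str(list(val.values())[1]) for val in data]
--     return [k for i, k in enumerate(keys) if k not in keys[:i] and k in keys[i+1:]]
-- ===== Notes on version B (the rewrite author's own statement) =====
-- stated objective: alternative
-- what changed: Eliminates counting altogether: instead of building a count dictionary and filtering it by >=2, B selects a key positionally at its first occurrence exactly when it reappears later, deciding first-occurrence by membership in the prefix keys[:i] and duplication by membership in the suffix keys[i+1:].
import Mathlib
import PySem

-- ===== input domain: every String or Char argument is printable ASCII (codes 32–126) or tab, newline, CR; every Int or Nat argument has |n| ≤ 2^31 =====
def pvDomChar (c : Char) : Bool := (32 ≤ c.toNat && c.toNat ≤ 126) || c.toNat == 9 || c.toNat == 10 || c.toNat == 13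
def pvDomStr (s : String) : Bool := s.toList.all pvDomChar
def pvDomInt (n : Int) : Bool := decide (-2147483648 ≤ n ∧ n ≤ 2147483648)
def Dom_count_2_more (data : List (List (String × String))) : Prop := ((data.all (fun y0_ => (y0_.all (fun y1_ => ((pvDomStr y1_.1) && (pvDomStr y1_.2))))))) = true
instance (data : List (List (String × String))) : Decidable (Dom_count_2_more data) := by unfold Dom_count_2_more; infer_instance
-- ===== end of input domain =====

-- ===== PORT A =====
-- B drops the counting dictionary entirely: a key is emitted at its first position iff it
-- reappears later, via prefix/suffix membership (objective: alternative, not faster).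
-- shared literal port of the extraction `str(list(val.values())[1])` (str of a str is the identity;
-- index 1 raises IndexError for dicts with fewer than two keys — excluded by Pre_, `""` is never used inside it)
def secondValue (val : List (String × String)) : String :=
  (PySem.List.pyGet? (PySem.Dict.ofList val).values 1).getD ""

def count_2_more (data : List (List (String × String))) : List String :=
  let count_dict := data.foldl (fun d val =>
      let dict_key := secondValue val
      if d.contains dict_key then d.insert dict_key (d.getD dict_key 0 + 1)
      else d.insert dict_key (1 : Int)) PySem.Dict.empty
  let filtered_dict := PySem.Dict.ofList (count_dict.items.filter (fun p => decide ((2 : Int) ≤ p.2)))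
  filtered_dict.keys

-- ===== PORT B =====
-- [k for i, k in enumerate(keys) if k not in keys[:i] and k in keys[i+1:]]
def count_2_more_alt (data : List (List (String × String))) : List String :=
  let keys := data.map secondValue
  ((PySem.List.enumerate keys 0).filter (fun p =>
      !(PySem.List.slice keys none (some p.1)).contains p.2
      && (PySem.List.slice keys (some (p.1 + 1)) none).contains p.2)).map Prod.snd

-- ===== PRECONDITION & SPEC =====
-- A (and B) raise IndexError when some `val` has fewer than two distinct keys; exactly those inputs are excluded.
def Pre_count_2_more (data : List (List (String × String))) : Prop :=
  ∀ val ∈ data, 2 ≤ (PySem.Dict.ofList val).values.length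
instance (data : List (List (String × String))) : Decidable (Pre_count_2_more data) := by
  unfold Pre_count_2_more; infer_instance
def pvWitness_count_2_more : (List (List (String × String))) :=
  [[("a", "x"), ("b", "y")], [("a", "z"), ("c", "y")], [("p", "q"), ("r", "y")]]
def Spec_count_2_more (data : List (List (String × String))) (out : List String) : Prop := out = count_2_more_alt data
instance (data : List (List (String × String))) (out : List String) : Decidable (Spec_count_2_more data out) := by unfold Spec_count_2_more; infer_instance

-- ===== CLAIM (what is proved, stated in full; the proofs are below) =====
def Claim_equal_count_2_more : Prop := ∀ (data : List (List (String × String))), Dom_count_2_more data → Pre_count_2_more data → Spec_count_2_more data (count_2_more data)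

-- ===== LEMMAS AND PROOFS =====
-- A's loop body equals the standard counter-loop body (when the key is absent, getD gives 0, so insert 1 = insert (0+1)).
theorem foldl_body_eq (l : List (List (String × String))) (d : PySem.Dict String Int) :
    l.foldl (fun d val =>
      let dict_key := secondValue val
      if d.contains dict_key then d.insert dict_key (d.getD dict_key 0 + 1)
      else d.insert dict_key (1 : Int)) d
    = l.foldl (fun d val => d.insert (secondValue val) (d.getD (secondValue val) 0 + 1)) d := by
  induction l generalizing d with
  | nil => rfl
  | cons v t ih =>
    simp only [List.foldl_cons]
    by_cases h : d.contains (secondValue v) = true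
    · simp only [h, if_true]
      exact ih _
    · rw [Bool.not_eq_true] at h
      simp only [h, if_false, Bool.false_eq_true, PySem.Dict.getD_of_not_contains _ _ h, zero_add]
      exact ih _

-- A's count_dict is Counter(keys)
theorem count_dict_eq_counter (data : List (List (String × String))) :
    data.foldl (fun d val =>
      let dict_key := secondValue val
      if d.contains dict_key then d.insert dict_key (d.getD dict_key 0 + 1)
      else d.insert dict_key (1 : Int)) PySem.Dict.empty
    = PySem.Dict.counter (data.map secondValue) := by
  rw [foldl_body_eq, ← PySem.Dict.foldl_insert_getD_add_one_eq_counter, List.foldl_map]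

-- ofList of a list with distinct keys keeps the items unchanged
theorem items_ofList_of_nodup {κ ν : Type} [BEq κ] [LawfulBEq κ] (l : List (κ × ν))
    (h : (l.map Prod.fst).Nodup) : (PySem.Dict.ofList l).items = l := by
  have := PySem.Dict.items_foldl_insert_fresh l Prod.fst Prod.snd PySem.Dict.empty
    (fun a _ => PySem.Dict.contains_empty _) h
  simpa [PySem.Dict.ofList, PySem.Dict.update] using this

-- A's result, in closed form: the distinct keys, in first-occurrence order, that occur at least twice.
theorem a_eq_canonical (data : List (List (String × String))) :
    count_2_more data
    = (PySem.Set.ofList (data.map secondValue)).filter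
        (fun k => decide (2 ≤ (data.map secondValue).count k)) := by
  simp only [count_2_more]
  rw [count_dict_eq_counter]
  set keys := data.map secondValue with hk
  rw [PySem.Dict.items_counter, List.filter_map]
  have hnd : ((((PySem.Set.ofList keys).filter
      (fun k => (decide ((2:Int) ≤ ((keys.count k : Nat) : Int))))).map
      (fun k => (k, ((keys.count k : Nat) : Int)))).map Prod.fst).Nodup := by
    rw [List.map_map,
      show (Prod.fst ∘ fun k => (k, ((keys.count k : Nat) : Int))) = id from rfl, List.map_id]
    exact (PySem.Set.nodup_ofList keys).filter _
  rw [show (fun p : String × Int => decide ((2:Int) ≤ p.2)) ∘ (fun k => (k, ((keys.count k : Nat) : Int)))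
      = fun k => decide ((2:Int) ≤ ((keys.count k : Nat) : Int)) from rfl]
  unfold PySem.Dict.keys
  rw [items_ofList_of_nodup _ hnd, List.map_map]
  rw [show (Prod.fst ∘ fun k => (k, ((keys.count k : Nat) : Int))) = id from rfl]
  rw [List.map_id]
  congr 1
  funext k
  simp

-- Set.discard is a filter
theorem discard_eq_filter (s : List String) (x : String) :
    PySem.Set.discard s x = s.filter (fun y => !(y == x)) := by
  simp [PySem.Set.discard]

-- B's enumerate/prefix/suffix scan, generalised over an already-consumed prefix,
-- equals the canonical form restricted to keys not seen in the prefix.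
theorem enum_filter_eq (t : List String) : ∀ (l pre : List String), pre ++ l = t →
    ((PySem.List.enumerate l (pre.length : Int)).filter (fun p =>
        !(PySem.List.slice t none (some p.1)).contains p.2
        && (PySem.List.slice t (some (p.1 + 1)) none).contains p.2)).map Prod.snd
    = (PySem.Set.ofList l).filter (fun k => !pre.contains k && decide (2 ≤ t.count k)) := by
  intro l
  induction l with
  | nil => intro pre h; simp [PySem.List.enumerate, PySem.Set.ofList]
  | cons k r ih =>
    intro pre h
    rw [PySem.List.enumerate_cons, PySem.Set.ofList_cons, List.filter_cons, List.filter_cons]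
    have hslice1 : PySem.List.slice t none (some ((pre.length : Nat) : Int)) = pre := by
      rw [PySem.List.slice_to_natCast, ← h, List.take_left]
    have hslice2 : PySem.List.slice t (some (((pre.length : Nat) : Int) + 1)) none = r := by
      rw [show ((pre.length : Nat) : Int) + 1 = (((pre.length + 1 : Nat)) : Int) by push_cast; ring,
        PySem.List.slice_from_natCast, ← h]
      rw [show pre ++ k :: r = (pre ++ [k]) ++ r by simp]
      rw [show pre.length + 1 = (pre ++ [k]).length by simp]
      exact List.drop_left
    have htail :
        ((PySem.List.enumerate r ((pre.length : Int) + 1)).filter (fun p =>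
            !(PySem.List.slice t none (some p.1)).contains p.2
            && (PySem.List.slice t (some (p.1 + 1)) none).contains p.2)).map Prod.snd
        = (PySem.Set.ofList r).filter (fun x => !(pre ++ [k]).contains x && decide (2 ≤ t.count x)) := by
      rw [show (pre.length : Int) + 1 = ((pre ++ [k]).length : Int) by simp]
      exact ih (pre ++ [k]) (by simpa using h)
    have hcount : t.count k = pre.count k + 1 + r.count k := by
      rw [← h]; simp [List.count_append]; omega
    -- head condition of B's filter equals the canonical head condition
    have hhead : (!(PySem.List.slice t none (some (((pre.length : Int), k).1))).contains (((pre.length : Int), k).2)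
          && (PySem.List.slice t (some ((((pre.length : Int), k).1) + 1)) none).contains (((pre.length : Int), k).2))
        = (!pre.contains k && decide (2 ≤ t.count k)) := by
      show (!(PySem.List.slice t none (some ((pre.length : Int)))).contains k
          && (PySem.List.slice t (some (((pre.length : Int)) + 1)) none).contains k) = _
      rw [hslice1, hslice2, hcount]
      by_cases hp : k ∈ pre
      · simp [hp]
      · have h0 : pre.count k = 0 := List.count_eq_zero.mpr hp
        by_cases hr : k ∈ r
        · have : 0 < r.count k := List.count_pos_iff.mpr hr
          simp [hp, hr, h0]; omega
        · have h1 : r.count k = 0 := List.count_eq_zero.mpr hr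
          simp [hp, hr, h0, h1]
    -- tail predicate on the RHS matches the discard-filtered tail
    have hdisc : (PySem.Set.discard (PySem.Set.ofList r) k).filter
          (fun x => !pre.contains x && decide (2 ≤ t.count x))
        = (PySem.Set.ofList r).filter (fun x => !(pre ++ [k]).contains x && decide (2 ≤ t.count x)) := by
      rw [discard_eq_filter, List.filter_filter]
      apply List.filter_congr
      intro x _
      by_cases hx : x = k
      · simp [hx]
      · simp [hx]
    rw [hhead]
    by_cases hc : (!pre.contains k && decide (2 ≤ t.count k)) = true
    · rw [if_pos hc, if_pos hc, List.map_cons, htail, ← hdisc]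
    · rw [if_neg hc, if_neg hc, htail, ← hdisc]

-- B equals the canonical form
theorem b_eq_canonical (data : List (List (String × String))) :
    count_2_more_alt data
    = (PySem.Set.ofList (data.map secondValue)).filter
        (fun k => decide (2 ≤ (data.map secondValue).count k)) := by
  simp only [count_2_more_alt]
  have := enum_filter_eq (data.map secondValue) (data.map secondValue) [] rfl
  simp only [List.length_nil, Nat.cast_zero] at this
  rw [this]
  apply List.filter_congr
  intro x _
  simp

-- ===== VERDICT (by name: the statement is the Claim_ definition above) =====
theorem count_2_more_spec : Claim_equal_count_2_more := by
  intro data _ _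
  unfold Spec_count_2_more
  rw [a_eq_canonical, b_eq_canonical]
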